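-- pv_equiv track=rewrite | github.com/k9g-fr/ijudge | calcopti.py | calc_count
-- ===== SOURCE A (Python) =====
-- def calc_count(num):
--     """counting"""
--     count = 0
--     digits = 1
--     while True:
--         start = 10**(digits - 1)
--         end = min(num, 10**digits - 1)
--         if start > num:
--             break
--         count += (end - start + 1) * (digits + 1)
--         digits += 1
--     return count
-- ===== SOURCE B (Python) =====
-- def calc_count(num):
--     """counting"""
--     if num < 1:
--         return 0
--     d = 1
--     while 10 ** d <= num:
--         d += 1
--     return (num + 1) * d - (10 ** d - 1) // 9 + num
-- ===== Notes on version B (the rewrite author's own statement) =====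
-- stated objective: simpler
-- what changed: Replaces A's per-band accumulation loop (one additive contribution per digit-length band) with a single closed-form expression in num and its digit count d (the repunit formula), after finding d with a small comparison loop.
import Mathlib
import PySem

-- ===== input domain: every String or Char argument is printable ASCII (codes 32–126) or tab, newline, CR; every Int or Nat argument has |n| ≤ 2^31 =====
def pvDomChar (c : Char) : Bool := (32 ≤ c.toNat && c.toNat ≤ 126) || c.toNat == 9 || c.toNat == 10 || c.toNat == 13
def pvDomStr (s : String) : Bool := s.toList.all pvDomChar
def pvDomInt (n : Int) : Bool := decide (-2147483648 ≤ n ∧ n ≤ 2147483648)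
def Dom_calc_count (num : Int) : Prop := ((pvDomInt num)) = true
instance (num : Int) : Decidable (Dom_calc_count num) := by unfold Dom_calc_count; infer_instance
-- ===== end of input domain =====

-- B replaces A's per-band accumulation with a closed-form count from the digit length of num (objective: simpler).

-- ===== PORT A =====
-- `while True` loop, carried as structural recursion on fuel; the loop breaks once
-- 10^(digits-1) > num, so fuel 64 is never exhausted for num < 10^64 (all of Dom).
-- `digits` starts at 1 and only increments, so it is carried as a Nat.
def calcLoopA (num : Int) : Nat → Int → Nat → Int
  | 0, count, _ => count
  | fuel + 1, count, digits =>
    let start : Int := 10 ^ (digits - 1)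
    let e : Int := min num (10 ^ digits - 1)
    if start > num then count
    else calcLoopA num fuel (count + (e - start + 1) * ((digits : Int) + 1)) (digits + 1)

def calc_count (num : Int) : Int := calcLoopA num 64 0 1

-- ===== PORT B =====
-- the `while 10 ** d <= num: d += 1` loop of Source B, fuel 64 (never exhausted for num < 10^64)
def digLoopB (num : Int) : Nat → Nat → Nat
  | 0, d => d
  | fuel + 1, d => if 10 ^ d ≤ num then digLoopB num fuel (d + 1) else d

def calc_count_alt (num : Int) : Int :=
  if num < 1 then 0
  else
    let d := digLoopB num 64 1
    (num + 1) * (d : Int) - PySem.Int.floordiv (10 ^ d - 1) 9 + num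

-- ===== PRECONDITION & SPEC =====
def Spec_calc_count (num : Int) (out : Int) : Prop := out = calc_count_alt num
instance (num : Int) (out : Int) : Decidable (Spec_calc_count num out) := by unfold Spec_calc_count; infer_instance

-- ===== CLAIM (what is proved, stated in full; the proofs are below) =====
def Claim_equal_calc_count : Prop := ∀ (num : Int), Dom_calc_count num → Spec_calc_count num (calc_count num)

-- ===== LEMMAS AND PROOFS =====

-- repunit: R d = (10^d - 1)/9 = 11...1 (d ones)
def pvRep : Nat → Int
  | 0 => 0
  | d + 1 => 10 * pvRep d + 1

theorem pvRep_mul (d : Nat) : 9 * pvRep d = 10 ^ d - 1 := by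
  induction d with
  | zero => simp [pvRep]
  | succ e ih => simp [pvRep, pow_succ]; ring_nf; ring_nf at ih; linarith

theorem pvFloordiv_rep (d : Nat) : PySem.Int.floordiv ((10 : Int) ^ d - 1) 9 = pvRep d := by
  rw [PySem.Int.floordiv_eq_iff_of_pos (by norm_num)]
  have h := pvRep_mul d
  constructor <;> linarith

theorem pvRep_succ (e : Nat) : pvRep (e + 1) = pvRep e + 10 ^ e := by
  have h1 := pvRep_mul e
  have h2 := pvRep_mul (e + 1)
  have hp : (10 : Int) ^ (e + 1) = 10 * 10 ^ e := by ring
  linarith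

theorem pvDigLoop_eq (num : Int) (hnum : 1 ≤ num) :
    ∀ (f d : Nat), 1 ≤ d → (10 : Int) ^ (d - 1) ≤ num → num < 10 ^ (d - 1 + f) →
      digLoopB num f d = Nat.log 10 num.toNat + 1 := by
  intro f
  induction f with
  | zero => intro d _ hlo hhi; simp at hhi; exact absurd hlo (not_le.mpr hhi)
  | succ f ih =>
    intro d hd hlo hhi
    obtain ⟨e, rfl⟩ : ∃ e, d = e + 1 := ⟨d - 1, by omega⟩
    simp only [Nat.add_sub_cancel] at hlo
    rw [digLoopB]
    by_cases h10 : (10 : Int) ^ (e + 1) ≤ num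
    · rw [if_pos h10]
      exact ih (e + 2) (by omega) (by simpa using h10) (by simpa [Nat.add_comm, Nat.add_assoc, Nat.add_left_comm] using hhi)
    · rw [if_neg h10]
      have hlo' : 10 ^ e ≤ num.toNat := by
        have : ((10 ^ e : Nat) : Int) ≤ num := by push_cast; exact hlo
        omega
      have hhi' : num.toNat < 10 ^ (e + 1) := by
        have : num < ((10 ^ (e + 1) : Nat) : Int) := by push_cast; omega
        omega
      rw [Nat.log_eq_of_pow_le_of_lt_pow hlo' hhi']

theorem pvLoopA_eq (num : Int) (hnum : 1 ≤ num) :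
    ∀ (f d : Nat) (count : Int), 1 ≤ d → (10 : Int) ^ (d - 1) ≤ num → num < 10 ^ (d - 1 + f) →
      calcLoopA num f count d =
        count + (num - 10 ^ (d - 1) + 1)
          + (num + 1) * ((Nat.log 10 num.toNat : Int) + 1) - pvRep (Nat.log 10 num.toNat + 1)
          - ((10 : Int) ^ (d - 1) * ((d : Int) - 1) - pvRep (d - 1)) := by
  intro f
  induction f with
  | zero => intro d count _ hlo hhi; simp at hhi; exact absurd hlo (not_le.mpr hhi)
  | succ f ih =>
    intro d count hd hlo hhi
    obtain ⟨e, rfl⟩ : ∃ e, d = e + 1 := ⟨d - 1, by omega⟩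
    simp only [Nat.add_sub_cancel] at hlo hhi
    rw [calcLoopA]
    simp only [Nat.add_sub_cancel, gt_iff_lt]
    rw [if_neg (not_lt.mpr hlo)]
    by_cases h10 : (10 : Int) ^ (e + 1) ≤ num
    · have hmin : min num ((10 : Int) ^ (e + 1) - 1) = 10 ^ (e + 1) - 1 := by
        apply min_eq_right; omega
      rw [ih (e + 2) _ (by omega) (by simpa using h10)
            (by simpa [Nat.add_comm, Nat.add_assoc, Nat.add_left_comm] using hhi)]
      simp only [hmin]
      have hs1 := pvRep_succ e
      have hp : (10 : Int) ^ (e + 1) = 10 * 10 ^ e := by ring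
      push_cast
      nlinarith [hs1, hp]
    · -- num has e+1 digits: the band d = e+1 is the last one; the next iteration breaks
      have hnumlt : num < (10 : Int) ^ (e + 1) := not_le.mp h10
      have hmin : min num ((10 : Int) ^ (e + 1) - 1) = num := by
        apply min_eq_left; omega
      have hret : ∀ (f' : Nat) (c : Int), calcLoopA num f' c (e + 2) = c := by
        intro f' c
        cases f' with
        | zero => rfl
        | succ f'' =>
          rw [calcLoopA]
          rw [show e + 2 - 1 = e + 1 by omega]
          simp only [gt_iff_lt]
          rw [if_pos hnumlt]
      rw [hret]
      have hlog : Nat.log 10 num.toNat = e := by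
        apply Nat.log_eq_of_pow_le_of_lt_pow
        · have : ((10 ^ e : Nat) : Int) ≤ num := by push_cast; exact hlo
          omega
        · have : num < ((10 ^ (e + 1) : Nat) : Int) := by push_cast; omega
          omega
      rw [hmin, hlog]
      have hs1 := pvRep_succ e
      push_cast
      nlinarith [hs1]

-- ===== VERDICT (by name: the statement is the Claim_ definition above) =====
theorem calc_count_spec : Claim_equal_calc_count := by
  intro num hdom
  unfold Spec_calc_count calc_count calc_count_alt
  by_cases h : num < 1
  · rw [if_pos h]
    rw [show (64 : Nat) = 63 + 1 from rfl]
    simp [calcLoopA, h]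
  · rw [if_neg h]
    have hnum : 1 ≤ num := by omega
    have hbound : num < (10 : Int) ^ (64 : Nat) := by
      have hd : num ≤ 2147483648 := by
        simp [Dom_calc_count, pvDomInt] at hdom; omega
      calc num ≤ 2147483648 := hd
        _ < (10 : Int) ^ (64 : Nat) := by norm_num
    rw [pvLoopA_eq num hnum 64 1 0 (by omega) (by simpa using hnum) (by simpa using hbound)]
    rw [pvDigLoop_eq num hnum 64 1 (by omega) (by simpa using hnum) (by simpa using hbound)]
    simp only [pvFloordiv_rep, Nat.sub_self, pow_zero, pvRep]
    push_cast
    ring
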